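-- pv_equiv track=rewrite | github.com/Bascratki/POO | 08-08/Projeto-Java/Testes com Java/lista.py | verifica_numero
-- ===== SOURCE A (Python) =====
-- def verifica_numero(lista):
--     multiplos_3 = []
--     pares = []
--     impares = []
--
--     for num in lista:
--         if num % 3 == 0:
--             multiplos_3.append(num)
--         if num % 2 == 0:
--             pares.append(num)
--         else:
--             impares.append(num)
--
--     return multiplos_3, pares, impares
-- ===== SOURCE B (Python) =====
-- def verifica_numero(lista):
--     if len(lista) == 0:
--         return [], [], []
--     if len(lista) == 1:
--         n = lista[0]
--         multiplos_3 = [n] if n % 3 == 0 else []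
--         if n % 2 == 0:
--             return multiplos_3, [n], []
--         return multiplos_3, [], [n]
--     mid = len(lista) // 2
--     m1, p1, i1 = verifica_numero(lista[:mid])
--     m2, p2, i2 = verifica_numero(lista[mid:])
--     return m1 + m2, p1 + p2, i1 + i2
-- ===== Notes on version B (the rewrite author's own statement) =====
-- stated objective: alternative
-- what changed: Replaces A's single linear accumulator loop with a divide-and-conquer recursion: the list is split in half, each half classified recursively, and the three result lists of the halves concatenated (correct because filtering distributes over concatenation).
import Mathlib
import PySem

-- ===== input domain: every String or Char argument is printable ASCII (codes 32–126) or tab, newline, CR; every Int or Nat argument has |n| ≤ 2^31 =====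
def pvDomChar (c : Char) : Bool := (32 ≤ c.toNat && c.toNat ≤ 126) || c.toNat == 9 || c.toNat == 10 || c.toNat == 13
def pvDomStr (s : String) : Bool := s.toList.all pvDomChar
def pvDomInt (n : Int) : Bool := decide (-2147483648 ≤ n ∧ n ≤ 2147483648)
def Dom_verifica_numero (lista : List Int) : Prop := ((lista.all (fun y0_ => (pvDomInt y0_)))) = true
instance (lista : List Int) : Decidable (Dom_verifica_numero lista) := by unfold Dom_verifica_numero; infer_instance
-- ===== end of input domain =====

-- B replaces A's single three-accumulator loop with a divide-and-conquer recursion on list halves (objective: alternative).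

-- ===== PORT A =====
-- A: one loop appending to three accumulators.
def verifica_numero (lista : List Int) : List Int × List Int × List Int :=
  lista.foldl
    (fun (st : List Int × List Int × List Int) num =>
      let st1 := if PySem.Int.mod num 3 = 0 then (st.1 ++ [num], st.2.1, st.2.2) else st
      if PySem.Int.mod num 2 = 0 then (st1.1, st1.2.1 ++ [num], st1.2.2)
      else (st1.1, st1.2.1, st1.2.2 ++ [num]))
    ([], [], [])

-- ===== PORT B =====
-- B: split in half, classify each half recursively, concatenate the three result lists.
-- (len(lista)//2 on a Nat length is exactly Nat division.)
def verifica_numero_alt (lista : List Int) : List Int × List Int × List Int :=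
  if lista.length = 0 then ([], [], [])
  else if lista.length = 1 then
    let n := lista.headI
    let multiplos_3 := if PySem.Int.mod n 3 = 0 then [n] else []
    if PySem.Int.mod n 2 = 0 then (multiplos_3, [n], []) else (multiplos_3, [], [n])
  else
    let mid : Nat := lista.length / 2
    let (m1, p1, i1) := verifica_numero_alt (PySem.List.slice lista none (some (mid : Int)))
    let (m2, p2, i2) := verifica_numero_alt (PySem.List.slice lista (some (mid : Int)) none)
    (m1 ++ m2, p1 ++ p2, i1 ++ i2)
termination_by lista.length
decreasing_by
  · rw [PySem.List.slice_to_natCast]; simp only [List.length_take]; omega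
  · rw [PySem.List.slice_from_natCast]; simp only [List.length_drop]; omega

-- ===== PRECONDITION & SPEC =====
def Spec_verifica_numero (lista : List Int) (out : List Int × List Int × List Int) : Prop := out = verifica_numero_alt lista
instance (lista : List Int) (out : List Int × List Int × List Int) : Decidable (Spec_verifica_numero lista out) := by unfold Spec_verifica_numero; infer_instance

-- ===== CLAIM (what is proved, stated in full; the proofs are below) =====
def Claim_equal_verifica_numero : Prop := ∀ (lista : List Int), Dom_verifica_numero lista → Spec_verifica_numero lista (verifica_numero lista)

-- ===== LEMMAS AND PROOFS =====

-- A's fold equals the three filters, with accumulators prefixed.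
theorem verifica_numero_fold (lista a p i : List Int) :
    lista.foldl
      (fun (st : List Int × List Int × List Int) num =>
        let st1 := if PySem.Int.mod num 3 = 0 then (st.1 ++ [num], st.2.1, st.2.2) else st
        if PySem.Int.mod num 2 = 0 then (st1.1, st1.2.1 ++ [num], st1.2.2)
        else (st1.1, st1.2.1, st1.2.2 ++ [num]))
      (a, p, i)
    = (a ++ lista.filter (fun n => PySem.Int.mod n 3 = 0),
       p ++ lista.filter (fun n => PySem.Int.mod n 2 = 0),
       i ++ lista.filter (fun n => PySem.Int.mod n 2 ≠ 0)) := by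
  induction lista generalizing a p i with
  | nil => simp
  | cons x xs ih =>
    by_cases h3 : PySem.Int.mod x 3 = 0 <;> by_cases h2 : PySem.Int.mod x 2 = 0 <;>
      simp only [List.foldl_cons, List.filter_cons, h3, h2, decide_true, decide_false,
        ne_eq, not_false_eq_true, not_true_eq_false, if_true, if_false, ih,
        List.append_assoc, List.singleton_append] <;> rfl

-- B's divide-and-conquer also computes the three filters (filter distributes over ++).
theorem verifica_numero_alt_eq (lista : List Int) :
    verifica_numero_alt lista
    = (lista.filter (fun n => PySem.Int.mod n 3 = 0),
       lista.filter (fun n => PySem.Int.mod n 2 = 0),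
       lista.filter (fun n => PySem.Int.mod n 2 ≠ 0)) := by
  induction hn : lista.length using Nat.strong_induction_on generalizing lista with
  | _ n ih =>
    rw [verifica_numero_alt]
    match lista, hn with
    | [], _ => simp
    | [x], _ =>
      by_cases h3 : (3:Int) ∣ x <;> by_cases h2 : (2:Int) ∣ x <;>
        simp [h3, h2] <;>
        · have hx : x % 2 = 1 := by omega
          simp [hx]
    | x :: y :: rest, hn =>
      have hlen : (x :: y :: rest).length ≠ 0 := by simp
      have hlen1 : (x :: y :: rest).length ≠ 1 := by simp
      simp only [hlen, hlen1, if_false]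
      set l := x :: y :: rest with hl
      set mid : Nat := l.length / 2 with hmid
      have h2le : 2 ≤ l.length := by simp [hl]
      rw [PySem.List.slice_to_natCast, PySem.List.slice_from_natCast]
      rw [ih (l.take mid).length (by subst hn; simp; omega) _ rfl,
          ih (l.drop mid).length (by subst hn; simp; omega) _ rfl]
      simp only [Prod.mk.injEq]
      refine ⟨?_, ?_, ?_⟩ <;> rw [← List.filter_append, List.take_append_drop]

-- ===== VERDICT (by name: the statement is the Claim_ definition above) =====
theorem verifica_numero_spec : Claim_equal_verifica_numero := by
  intro lista _
  show verifica_numero lista = verifica_numero_alt lista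
  rw [verifica_numero, verifica_numero_fold, verifica_numero_alt_eq]
  simp
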